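-- pv_equiv track=rewrite | github.com/shawnhymers/challenges | labs109.py | count_consecutive_summers
-- ===== SOURCE A (Python) =====
-- def count_consecutive_summers(n):
--     count = 0
--     if n ==1:
--         return(1)
--     for i in range(1,n+1):
--         j = i
--         sum = 0
--         if j ==n:
--             count +=1
--             return(count)
--         while j<=n:
--             sum += j
--             j+=1
--             if sum ==n:
--                 count +=1
--
--     return(count)
-- ===== SOURCE B (Python) =====
-- def count_consecutive_summers(n):
--     # Count runs of consecutive positive integers summing to n, one candidate
--     # per run LENGTH L: a run of length L starting at a>=1 exists iff
--     # L*(L+1)/2 <= n and L divides n - L*(L-1)/2.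
--     count = 0
--     L = 1
--     while L * (L + 1) // 2 <= n:
--         if (n - L * (L - 1) // 2) % L == 0:
--             count += 1
--         L += 1
--     return count
-- ===== Notes on version B (the rewrite author's own statement) =====
-- stated objective: faster
-- what changed: A scans every starting point i in 1..n and re-sums the run i,i+1,... up to n (O(n^2)); B instead iterates over the run LENGTH L while L(L+1)/2 <= n and counts L iff L divides n - L(L-1)/2, the closed-form condition for a valid start, so it stops after about sqrt(2n) steps.
import Mathlib
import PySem

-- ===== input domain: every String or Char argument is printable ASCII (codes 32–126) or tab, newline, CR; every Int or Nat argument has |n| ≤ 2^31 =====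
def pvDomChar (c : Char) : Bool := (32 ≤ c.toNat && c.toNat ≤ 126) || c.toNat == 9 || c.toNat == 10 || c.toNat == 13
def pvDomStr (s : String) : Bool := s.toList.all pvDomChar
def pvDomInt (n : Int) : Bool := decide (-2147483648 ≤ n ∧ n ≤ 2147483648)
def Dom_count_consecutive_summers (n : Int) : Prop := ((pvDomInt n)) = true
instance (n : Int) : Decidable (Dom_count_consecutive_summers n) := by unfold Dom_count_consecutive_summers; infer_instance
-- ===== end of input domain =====

-- B is a different algorithm: instead of A's scan over all starting points with
-- re-summation, B iterates over run lengths L while L(L+1)/2 ≤ n and counts L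
-- iff L divides n - L(L-1)/2 (a timing run measured B faster).

-- ===== PORT A =====
-- inner while loop of A: j, sum (s), count (c)
def pvInnerA (n j s c : Int) : Int :=
  if h : j ≤ n then
    pvInnerA n (j + 1) (s + j) (if s + j = n then c + 1 else c)
  else c
termination_by (n + 1 - j).toNat
decreasing_by omega

-- outer for loop of A, with the early return at i == n
def pvOuterA (n : Int) : List Int → Int → Int
  | [], c => c
  | i :: rest, c =>
    if i = n then c + 1
    else pvOuterA n rest (pvInnerA n i 0 c)

def count_consecutive_summers (n : Int) : Int :=
  if n = 1 then 1 else pvOuterA n (PySem.List.pyRange 1 (n + 1) 1) 0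

-- ===== PORT B =====
-- termination fact for B's while loop: the loop condition bounds L by n
theorem pvLB_le (n L : Int) (h : PySem.Int.floordiv (L * (L + 1)) 2 ≤ n) : L ≤ n := by
  rw [PySem.Int.floordiv_eq_ediv_of_pos (by norm_num)] at h
  by_cases hL : 1 ≤ L
  · have h2 : 2 * L ≤ L * (L + 1) := by nlinarith
    have : L ≤ L * (L + 1) / 2 := by omega
    omega
  · have hL' : L ≤ 0 := by omega
    have h0 : 0 ≤ L * (L + 1) := by
      rcases eq_or_ne L 0 with rfl | hne
      · norm_num
      · have h1 : L + 1 ≤ 0 := by omega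
        nlinarith [mul_nonneg (neg_nonneg.2 hL') (neg_nonneg.2 h1)]
    have : 0 ≤ L * (L + 1) / 2 := Int.ediv_nonneg h0 (by norm_num)
    omega

def pvLoopB (n L c : Int) : Int :=
  if h : PySem.Int.floordiv (L * (L + 1)) 2 ≤ n then
    pvLoopB n (L + 1)
      (if PySem.Int.mod (n - PySem.Int.floordiv (L * (L - 1)) 2) L = 0 then c + 1 else c)
  else c
termination_by (n + 1 - L).toNat
decreasing_by have := pvLB_le n L h; omega

def count_consecutive_summers_alt (n : Int) : Int := pvLoopB n 1 0

-- ===== PRECONDITION & SPEC =====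
def Spec_count_consecutive_summers (n : Int) (out : Int) : Prop := out = count_consecutive_summers_alt n
instance (n : Int) (out : Int) : Decidable (Spec_count_consecutive_summers n out) := by unfold Spec_count_consecutive_summers; infer_instance

-- ===== CLAIM (what is proved, stated in full; the proofs are below) =====
def Claim_equal_count_consecutive_summers : Prop := ∀ (n : Int), Dom_count_consecutive_summers n → Spec_count_consecutive_summers n (count_consecutive_summers n)

-- ===== LEMMAS AND PROOFS =====

-- the relation: a run of length L starting at i sums to n
abbrev pvR (n i L : Int) : Prop := 1 ≤ i ∧ 1 ≤ L ∧ L * (2 * i + L - 1) = 2 * n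

-- the lengths L admissible for start i, and the starts i admissible for length L
noncomputable def pvWitL (n i : Int) : Finset Int := (Finset.Icc 1 n).filter (fun L => pvR n i L)
noncomputable def pvWitI (n L : Int) : Finset Int := (Finset.Icc 1 n).filter (fun i => pvR n i L)

theorem mem_pvWitL {n i L : Int} : L ∈ pvWitL n i ↔ L ∈ Finset.Icc 1 n ∧ pvR n i L := by
  unfold pvWitL; exact Finset.mem_filter

theorem mem_pvWitI {n L i : Int} : i ∈ pvWitI n L ↔ i ∈ Finset.Icc 1 n ∧ pvR n i L := by
  unfold pvWitI; exact Finset.mem_filter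

theorem pvIcc_left (a b : Int) (h : a ≤ b) :
    Finset.Icc a b = insert a (Finset.Icc (a + 1) b) := by
  ext x; simp only [Finset.mem_Icc, Finset.mem_insert]; omega

theorem pvIcc_right (a b : Int) (h : a ≤ b) :
    Finset.Icc a b = insert b (Finset.Icc a (b - 1)) := by
  ext x; simp only [Finset.mem_Icc, Finset.mem_insert]; omega

-- Gauss: twice the sum of Icc i k
theorem pvGauss (i k : Int) (h : i ≤ k) :
    2 * (∑ t ∈ Finset.Icc i k, t) = (k - i + 1) * (i + k) := by
  induction k, h using Int.le_induction with
  | base => simp [Finset.Icc_self]; ring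
  | succ k hk ih =>
    rw [pvIcc_right i (k + 1) (by omega), Finset.sum_insert (by simp [Finset.mem_Icc])]
    have : k + 1 - 1 = k := by ring
    rw [this]
    nlinarith [ih]

-- sum from i grows strictly with the endpoint (i ≥ 1)
theorem pvSumMono (i k k' : Int) (hi : 1 ≤ i) (hk : i ≤ k) (hkk : k < k') :
    (∑ t ∈ Finset.Icc i k, t) < (∑ t ∈ Finset.Icc i k', t) := by
  have g1 := pvGauss i k hk
  have g2 := pvGauss i k' (by omega)
  have hp : 0 < (k' - k) * (k' + k + 1) :=
    mul_pos (by omega) (by omega)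
  nlinarith [g1, g2, hp]

-- inner loop counts the endpoints k in [j, n] where the running sum hits n
theorem pvInnerA_eq (n j s c : Int) :
    pvInnerA n j s c =
      c + (((Finset.Icc j n).filter (fun k => s + ∑ t ∈ Finset.Icc j k, t = n)).card : Int) := by
  fun_induction pvInnerA n j s c with
  | case1 j s c h ih =>
    simp only [dite_eq_ite] at ih
    rw [ih]
    have hsplit : ((Finset.Icc j n).filter (fun k => s + ∑ t ∈ Finset.Icc j k, t = n)).card
        = (if s + j = n then 1 else 0)
          + ((Finset.Icc (j+1) n).filter (fun k => (s + j) + ∑ t ∈ Finset.Icc (j+1) k, t = n)).card := by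
      rw [pvIcc_left j n h, Finset.filter_insert]
      have hnotmem : j ∉ (Finset.Icc (j+1) n).filter (fun k => s + ∑ t ∈ Finset.Icc j k, t = n) := by
        simp [Finset.mem_Icc]
      have hcongr : (Finset.Icc (j+1) n).filter (fun k => s + ∑ t ∈ Finset.Icc j k, t = n)
          = (Finset.Icc (j+1) n).filter (fun k => (s + j) + ∑ t ∈ Finset.Icc (j+1) k, t = n) := by
        apply Finset.filter_congr
        intro k hkmem
        simp only [Finset.mem_Icc] at hkmem
        have : ∑ t ∈ Finset.Icc j k, t = j + ∑ t ∈ Finset.Icc (j+1) k, t := by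
          rw [pvIcc_left j k (by omega), Finset.sum_insert (by simp [Finset.mem_Icc])]
        rw [this]
        constructor <;> intro hh <;> omega
      have hsumj : (∑ t ∈ Finset.Icc j j, t) = j := by simp [Finset.Icc_self]
      have hnotmem' : j ∉ (Finset.Icc (j+1) n).filter
          (fun k => (s + j) + ∑ t ∈ Finset.Icc (j+1) k, t = n) := by
        simp [Finset.mem_Icc]
      rw [hsumj, hcongr]
      split_ifs with hc
      · rw [Finset.card_insert_of_notMem hnotmem']
        omega
      · omega
    rw [hsplit]
    push_cast
    split_ifs <;> ring
  | case2 j s c h =>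
    have he : Finset.Icc j n = ∅ := Finset.Icc_eq_empty (by omega)
    simp [he]

-- for i ≥ 1 the inner count is 0/1, characterized by nonemptiness of pvWitL
theorem pvInner_card (n i : Int) (hi : 1 ≤ i) :
    (((Finset.Icc i n).filter (fun k => 0 + ∑ t ∈ Finset.Icc i k, t = n)).card : Int) =
      if 0 < (pvWitL n i).card then 1 else 0 := by
  set F := (Finset.Icc i n).filter (fun k => 0 + ∑ t ∈ Finset.Icc i k, t = n) with hF
  have dir1 : ∀ k ∈ F, (i + (k - i + 1) - 1 = k) ∧ (k - i + 1) ∈ pvWitL n i := by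
    intro k hk
    rw [hF, Finset.mem_filter, Finset.mem_Icc] at hk
    obtain ⟨⟨hik, hkn⟩, hsum⟩ := hk
    have g := pvGauss i k hik
    refine ⟨by ring, ?_⟩
    rw [mem_pvWitL, Finset.mem_Icc]
    refine ⟨⟨by omega, by omega⟩, by omega, by omega, by nlinarith⟩
  have dir2 : ∀ L ∈ pvWitL n i, (i + L - 1) ∈ F := by
    intro L hL
    rw [mem_pvWitL, Finset.mem_Icc] at hL
    obtain ⟨⟨hL1, hLn⟩, _, _, hprod⟩ := hL
    have hik : i ≤ i + L - 1 := by omega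
    have g := pvGauss i (i + L - 1) hik
    have hsum : (∑ t ∈ Finset.Icc i (i + L - 1), t) = n := by nlinarith
    have hkn : i + L - 1 ≤ n := by
      have hterm : 0 ≤ (L - 1) * (2 * i + L - 2) :=
        mul_nonneg (by omega) (by omega)
      nlinarith
    rw [hF, Finset.mem_filter, Finset.mem_Icc]
    exact ⟨⟨hik, hkn⟩, by omega⟩
  have huniq : ∀ k ∈ F, ∀ k' ∈ F, k = k' := by
    intro k hk k' hk'
    rw [hF, Finset.mem_filter, Finset.mem_Icc] at hk hk'
    rcases lt_trichotomy k k' with h | h | h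
    · have := pvSumMono i k k' hi hk.1.1 h; omega
    · exact h
    · have := pvSumMono i k' k hi hk'.1.1 h; omega
  split_ifs with hpos
  · obtain ⟨L, hL⟩ := Finset.card_pos.mp hpos
    have hk := dir2 L hL
    have : F = {i + L - 1} := by
      apply Finset.eq_singleton_iff_unique_mem.mpr
      exact ⟨hk, fun x hx => huniq x hx _ hk⟩
    rw [this]; simp
  · have : F = ∅ := by
      rw [Finset.eq_empty_iff_forall_notMem]
      intro k hk
      exact hpos (Finset.card_pos.mpr ⟨_, (dir1 k hk).2⟩)
    rw [this]; simp

-- outer loop = sum of inner counts over i ∈ [a, n]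
theorem pvOuterA_eq_aux : ∀ (m : Nat) (n a c : Int), 1 ≤ a → a ≤ n → (n - a).toNat = m →
    pvOuterA n (PySem.List.pyRange a (n + 1) 1) c =
      c + ∑ i ∈ Finset.Icc a n,
        (((Finset.Icc i n).filter (fun k => 0 + ∑ t ∈ Finset.Icc i k, t = n)).card : Int) := by
  intro m
  induction m using Nat.strong_induction_on with
  | _ m ih =>
    intro n a c ha han hm
    rcases eq_or_lt_of_le han with heq | hlt
    · subst heq
      rw [PySem.List.pyRange_one_singleton]
      have hsum : (∑ t ∈ Finset.Icc a a, t) = a := by simp [Finset.Icc_self]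
      have hfil : (Finset.Icc a a).filter (fun k => 0 + ∑ t ∈ Finset.Icc a k, t = a) = {a} := by
        rw [Finset.Icc_self, Finset.filter_singleton, if_pos (by omega)]
      have hone : ∑ i ∈ Finset.Icc a a,
          (((Finset.Icc i a).filter (fun k => 0 + ∑ t ∈ Finset.Icc i k, t = a)).card : Int)
          = 1 := by
        rw [Finset.Icc_self, Finset.sum_singleton, hfil]
        simp
      rw [hone]
      rw [show pvOuterA a [a] c = if a = a then c + 1 else pvOuterA a [] (pvInnerA a a 0 c) from rfl,
          if_pos rfl]
    · rw [PySem.List.pyRange_one_cons (by omega)]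
      rw [show pvOuterA n (a :: PySem.List.pyRange (a + 1) (n + 1) 1) c
            = if a = n then c + 1
              else pvOuterA n (PySem.List.pyRange (a + 1) (n + 1) 1) (pvInnerA n a 0 c) from rfl]
      rw [if_neg (by omega)]
      rw [pvInnerA_eq]
      rw [ih ((n - (a+1)).toNat) (by omega) n (a + 1) _ (by omega) (by omega) rfl]
      have hs : ∑ i ∈ Finset.Icc a n,
          (((Finset.Icc i n).filter (fun k => 0 + ∑ t ∈ Finset.Icc i k, t = n)).card : Int)
          = (((Finset.Icc a n).filter (fun k => 0 + ∑ t ∈ Finset.Icc a k, t = n)).card : Int)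
            + ∑ i ∈ Finset.Icc (a+1) n,
              (((Finset.Icc i n).filter (fun k => 0 + ∑ t ∈ Finset.Icc i k, t = n)).card : Int) := by
        have hnm : a ∉ Finset.Icc (a + 1) n := by
          intro hmem
          rw [Finset.mem_Icc] at hmem
          omega
        have hins := Finset.sum_insert (s := Finset.Icc (a + 1) n) (a := a)
          (f := fun i => (((Finset.Icc i n).filter
            (fun k => 0 + ∑ t ∈ Finset.Icc i k, t = n)).card : Int)) hnm
        rw [← pvIcc_left a n (by omega)] at hins
        exact hins
      rw [hs]
      ring

theorem pvOuterA_eq (n a c : Int) (ha : 1 ≤ a) (han : a ≤ n) :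
    pvOuterA n (PySem.List.pyRange a (n + 1) 1) c =
      c + ∑ i ∈ Finset.Icc a n,
        (((Finset.Icc i n).filter (fun k => 0 + ∑ t ∈ Finset.Icc i k, t = n)).card : Int) :=
  pvOuterA_eq_aux (n - a).toNat n a c ha han rfl

-- B's loop counts L in [L0, n] satisfying its loop-body condition (L0 ≥ 1)
theorem pvLoopB_eq (n L0 c : Int) (hL0 : 1 ≤ L0) :
    pvLoopB n L0 c =
      c + (((Finset.Icc L0 n).filter (fun L =>
        PySem.Int.floordiv (L * (L + 1)) 2 ≤ n ∧
        PySem.Int.mod (n - PySem.Int.floordiv (L * (L - 1)) 2) L = 0)).card : Int) := by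
  fun_induction pvLoopB n L0 c with
  | case1 L0 c h ih =>
    simp only [dite_eq_ite] at ih
    rw [ih (by omega)]
    have hLn : L0 ≤ n := pvLB_le n L0 h
    have hs : (((Finset.Icc L0 n).filter (fun L =>
          PySem.Int.floordiv (L * (L + 1)) 2 ≤ n ∧
          PySem.Int.mod (n - PySem.Int.floordiv (L * (L - 1)) 2) L = 0)).card : Int)
        = (if PySem.Int.mod (n - PySem.Int.floordiv (L0 * (L0 - 1)) 2) L0 = 0 then 1 else 0)
          + (((Finset.Icc (L0 + 1) n).filter (fun L =>
          PySem.Int.floordiv (L * (L + 1)) 2 ≤ n ∧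
          PySem.Int.mod (n - PySem.Int.floordiv (L * (L - 1)) 2) L = 0)).card : Int) := by
      rw [pvIcc_left L0 n hLn, Finset.filter_insert]
      have hnm : L0 ∉ (Finset.Icc (L0 + 1) n).filter (fun L =>
          PySem.Int.floordiv (L * (L + 1)) 2 ≤ n ∧
          PySem.Int.mod (n - PySem.Int.floordiv (L * (L - 1)) 2) L = 0) := by
        simp [Finset.mem_Icc]
      simp only [h, true_and]
      split_ifs with hc
      · rw [Finset.card_insert_of_notMem hnm]
        push_cast
        ring
      · ring
    rw [hs]
    split_ifs <;> ring
  | case2 L0 c h =>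
    have hempty : (Finset.Icc L0 n).filter (fun L =>
        PySem.Int.floordiv (L * (L + 1)) 2 ≤ n ∧
        PySem.Int.mod (n - PySem.Int.floordiv (L * (L - 1)) 2) L = 0) = ∅ := by
      rw [Finset.eq_empty_iff_forall_notMem]
      intro L hL
      rw [Finset.mem_filter, Finset.mem_Icc] at hL
      obtain ⟨⟨h1, h2⟩, hcond, _⟩ := hL
      apply h
      rw [PySem.Int.floordiv_eq_ediv_of_pos (by norm_num)] at hcond ⊢
      have hmono : L0 * (L0 + 1) ≤ L * (L + 1) := by nlinarith
      have := Int.ediv_le_ediv (by norm_num : (0:Int) < 2) hmono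
      omega
    rw [hempty]
    simp

-- B's loop-body condition ⟺ some start i works for length L
theorem pvCondB (n L : Int) (hL : 1 ≤ L) (hn : 1 ≤ n) :
    (PySem.Int.floordiv (L * (L + 1)) 2 ≤ n ∧
     PySem.Int.mod (n - PySem.Int.floordiv (L * (L - 1)) 2) L = 0) ↔
    0 < (pvWitI n L).card := by
  obtain ⟨h1, hh1⟩ : ∃ h1, L * (L + 1) = h1 + h1 := Int.even_mul_succ_self L
  obtain ⟨h2, hh2⟩ : ∃ h2, L * (L - 1) = h2 + h2 := by
    obtain ⟨r, hr⟩ : ∃ r, (L - 1) * ((L - 1) + 1) = r + r := Int.even_mul_succ_self (L - 1)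
    exact ⟨r, by linear_combination hr⟩
  have e1 : PySem.Int.floordiv (L * (L + 1)) 2 = h1 := by
    rw [PySem.Int.floordiv_eq_ediv_of_pos (by norm_num), hh1]
    omega
  have e2 : PySem.Int.floordiv (L * (L - 1)) 2 = h2 := by
    rw [PySem.Int.floordiv_eq_ediv_of_pos (by norm_num), hh2]
    omega
  rw [e1, e2, PySem.Int.mod_eq_zero_iff_dvd]
  constructor
  · rintro ⟨hTn, q, hq⟩
    rw [Finset.card_pos]
    have hq1 : 1 ≤ q := by
      have hgap : h1 - h2 = L := by
        have : 2 * (h1 - h2) = 2 * L := by linear_combination hh2 - hh1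
        omega
      have hLq : L * 1 ≤ L * q := by omega
      exact le_of_mul_le_mul_left hLq (by omega)
    refine ⟨q, mem_pvWitI.mpr ⟨Finset.mem_Icc.mpr ⟨hq1, ?_⟩, hq1, hL, ?_⟩⟩
    · nlinarith [hq, hh2, mul_le_mul_of_nonneg_right hL (by omega : (0:Int) ≤ q),
        mul_nonneg (by omega : (0:Int) ≤ L) (by omega : (0:Int) ≤ L - 1)]
    · linear_combination (-2) * hq + hh2
  · rintro hpos
    obtain ⟨i, hi⟩ := Finset.card_pos.mp hpos
    rw [mem_pvWitI, Finset.mem_Icc] at hi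
    obtain ⟨⟨hi1, hin⟩, -, -, hprod⟩ := hi
    constructor
    · nlinarith [hh1, hprod, mul_le_mul_of_nonneg_left (by omega : L + 1 ≤ 2 * i + L - 1)
        (by omega : (0:Int) ≤ L)]
    · refine ⟨i, ?_⟩
      have h2' : 2 * (n - h2) = 2 * (L * i) := by linear_combination (-1) * hprod + hh2
      omega

-- pvR determines L from i
theorem pvR_uniqL (n i L L' : Int) (h1 : pvR n i L) (h2 : pvR n i L') : L = L' := by
  obtain ⟨hi, hL, hp⟩ := h1
  obtain ⟨-, hL', hp'⟩ := h2
  rcases lt_trichotomy L L' with h | h | h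
  · have := mul_pos (show (0:Int) < L' - L by omega) (show (0:Int) < 2*i + L + L' - 1 by omega)
    nlinarith
  · exact h
  · have := mul_pos (show (0:Int) < L - L' by omega) (show (0:Int) < 2*i + L + L' - 1 by omega)
    nlinarith

-- pvR determines i from L
theorem pvR_uniqI (n i i' L : Int) (h1 : pvR n i L) (h2 : pvR n i' L) : i = i' := by
  obtain ⟨hi, hL, hp⟩ := h1
  obtain ⟨hi', -, hp'⟩ := h2
  have : L * (2 * i + L - 1) = L * (2 * i' + L - 1) := by omega
  have := mul_left_cancel₀ (show L ≠ 0 by omega) this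
  omega

-- the two projections of the relation have the same cardinality
theorem pvBij (n : Int) :
    ((Finset.Icc 1 n).filter (fun i => 0 < (pvWitL n i).card)).card =
    ((Finset.Icc 1 n).filter (fun L => 0 < (pvWitI n L).card)).card := by
  apply Finset.card_bij (fun i hi =>
    (Finset.card_pos.mp (Finset.mem_filter.mp hi).2).choose)
  · intro i hi
    have hmem := mem_pvWitL.mp (Finset.card_pos.mp (Finset.mem_filter.mp hi).2).choose_spec
    rw [Finset.mem_filter]
    refine ⟨hmem.1, Finset.card_pos.mpr ⟨i, ?_⟩⟩
    rw [mem_pvWitI]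
    exact ⟨(Finset.mem_filter.mp hi).1, hmem.2⟩
  · intro i1 h1 i2 h2 heq
    have m1 := mem_pvWitL.mp (Finset.card_pos.mp (Finset.mem_filter.mp h1).2).choose_spec
    have m2 := mem_pvWitL.mp (Finset.card_pos.mp (Finset.mem_filter.mp h2).2).choose_spec
    rw [heq] at m1
    exact pvR_uniqI n i1 i2 _ m1.2 m2.2
  · intro L hL
    rw [Finset.mem_filter] at hL
    obtain ⟨hLIcc, hpos⟩ := hL
    obtain ⟨i, hi⟩ := Finset.card_pos.mp hpos
    rw [mem_pvWitI] at hi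
    have hisrc : i ∈ (Finset.Icc 1 n).filter (fun i => 0 < (pvWitL n i).card) := by
      rw [Finset.mem_filter]
      refine ⟨hi.1, Finset.card_pos.mpr ⟨L, ?_⟩⟩
      rw [mem_pvWitL]
      exact ⟨hLIcc, hi.2⟩
    refine ⟨i, hisrc, ?_⟩
    have hmem := mem_pvWitL.mp (Finset.card_pos.mp (Finset.mem_filter.mp hisrc).2).choose_spec
    exact pvR_uniqL n i _ L hmem.2 hi.2

-- B's port equals the count of valid lengths, for every n
theorem pvB_card (n : Int) :
    count_consecutive_summers_alt n =
      (((Finset.Icc 1 n).filter (fun L => 0 < (pvWitI n L).card)).card : Int) := by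
  unfold count_consecutive_summers_alt
  rw [pvLoopB_eq n 1 0 le_rfl, zero_add]
  by_cases hn : 1 ≤ n
  · have hcg : (Finset.Icc 1 n).filter (fun L =>
        PySem.Int.floordiv (L * (L + 1)) 2 ≤ n ∧
        PySem.Int.mod (n - PySem.Int.floordiv (L * (L - 1)) 2) L = 0)
        = (Finset.Icc 1 n).filter (fun L => 0 < (pvWitI n L).card) :=
      Finset.filter_congr (fun L hL => by
        rw [Finset.mem_Icc] at hL
        exact pvCondB n L hL.1 hn)
    rw [hcg]
  · rw [Finset.Icc_eq_empty (by omega)]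
    simp

-- A's port equals the count of valid starting points, for n ≥ 1 and n ≠ 1
theorem pvA_card (n : Int) (hn : 1 ≤ n) (h1 : n ≠ 1) :
    count_consecutive_summers n =
      (((Finset.Icc 1 n).filter (fun i => 0 < (pvWitL n i).card)).card : Int) := by
  unfold count_consecutive_summers
  rw [if_neg h1]
  rw [pvOuterA_eq n 1 0 le_rfl hn]
  rw [Finset.sum_congr rfl (fun i hi => pvInner_card n i (Finset.mem_Icc.mp hi).1)]
  rw [Finset.sum_boole]
  ring

-- ===== VERDICT (by name: the statement is the Claim_ definition above) =====
theorem count_consecutive_summers_spec : Claim_equal_count_consecutive_summers := by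
  intro n _
  unfold Spec_count_consecutive_summers
  by_cases hn : 1 ≤ n
  · by_cases h1 : n = 1
    · subst h1
      have hone : ((Finset.Icc (1:Int) 1).filter (fun L => 0 < (pvWitI 1 L).card)).card = 1 := by
        have hc : 0 < (pvWitI 1 1).card :=
          Finset.card_pos.mpr ⟨1, mem_pvWitI.mpr
            ⟨Finset.mem_Icc.mpr ⟨le_rfl, le_rfl⟩, le_rfl, le_rfl, by norm_num⟩⟩
        rw [Finset.Icc_self, Finset.filter_singleton, if_pos hc]
        simp
      rw [pvB_card, hone]
      rfl
    · rw [pvA_card n hn h1, pvB_card, pvBij]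
  · have hA : count_consecutive_summers n = 0 := by
      unfold count_consecutive_summers
      rw [if_neg (by omega), PySem.List.pyRange_one_eq_nil (by omega)]
      rfl
    have hB : count_consecutive_summers_alt n = 0 := by
      rw [pvB_card, Finset.Icc_eq_empty (by omega)]
      simp
    rw [hA, hB]
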